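-- pv_equiv track=rewrite | github.com/samuelo49/DS-ALGOS | linkedlist/palindromelinkeslist.py | createPalindromeLL
-- ===== SOURCE A (Python) =====
-- class Node:
--     def __init__(self, val, next=None):
--         self.val = val
--         self.next = next
--
-- def toString(head):
--     if head is None:
--         return "<empty>"
--     parts = []
--     while head:
--         parts.append(str(head.val))
--         head = head.next
--     return "->".join(parts)
--
-- def createPalindromeLL(array):
--     if len(array) == 0:
--         return None
--     sentinel = Node(0)
--     currentNode = sentinel
--     for i in range(len(array)):
--         currentNode.next = Node(array[i])
--         currentNode = currentNode.next
--
--     for i in range(len(array) - 2, -1, -1):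
--         currentNode.next = Node(array[i])
--         currentNode = currentNode.next
--     return toString(sentinel.next)
-- ===== SOURCE B (Python) =====
-- def createPalindromeLL(array):
--     if len(array) == 0:
--         return None
--     seq = list(array) + array[:-1][::-1]
--     return "->".join(str(x) for x in seq)
-- ===== Notes on version B (the rewrite author's own statement) =====
-- stated objective: simpler
-- what changed: Drops the Node class, sentinel and pointer walk entirely: B builds the palindrome value sequence as a flat list (array + array[:-1][::-1]) and joins it directly, avoiding per-element object allocation and traversal.
import Mathlib
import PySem

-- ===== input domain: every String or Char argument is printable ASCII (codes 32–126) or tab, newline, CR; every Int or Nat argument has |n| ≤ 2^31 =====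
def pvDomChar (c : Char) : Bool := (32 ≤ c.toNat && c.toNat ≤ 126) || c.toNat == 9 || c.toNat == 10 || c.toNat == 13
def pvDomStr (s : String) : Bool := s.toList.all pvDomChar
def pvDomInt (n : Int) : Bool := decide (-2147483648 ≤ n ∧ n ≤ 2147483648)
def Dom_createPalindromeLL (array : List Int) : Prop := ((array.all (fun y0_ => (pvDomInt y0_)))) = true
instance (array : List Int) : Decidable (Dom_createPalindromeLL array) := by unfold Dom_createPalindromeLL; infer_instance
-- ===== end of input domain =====

-- B replaces A's sentinel linked list and pointer traversal by one flat list
-- array ++ reverse (array[:-1]) joined directly (objective: simpler).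


-- ===== PORT A =====
-- the linked list built from the sentinel is represented by its list of values
-- (Node chain walked in order); toString of None is "<empty>"
def toStringA (vals : List Int) : String :=
  if vals = [] then "<empty>"
  else PySem.Str.join "->" (vals.map PySem.Int.toStr)

def createPalindromeLL (array : List Int) : Option String :=
  if array.length = 0 then none
  else
    -- first loop: append array[i] for i in range(len(array))
    let vals1 := (PySem.List.pyRange 0 (array.length : Int) 1).foldl
      (fun acc i => acc ++ [PySem.List.pyGetD array i 0]) []
    -- second loop: append array[i] for i in range(len(array)-2, -1, -1)
    let vals2 := (PySem.List.pyRange ((array.length : Int) - 2) (-1) (-1)).foldl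
      (fun acc i => acc ++ [PySem.List.pyGetD array i 0]) vals1
    some (toStringA vals2)

-- ===== PORT B =====
def createPalindromeLL_alt (array : List Int) : Option String :=
  if array = [] then none
  else
    -- seq = list(array) + array[:-1][::-1]
    let seq := array ++
      ((PySem.List.slice? (PySem.List.slice array none (some (-1))) none none (-1)).getD [])
    some (PySem.Str.join "->" (seq.map PySem.Int.toStr))

-- ===== PRECONDITION & SPEC =====
def Spec_createPalindromeLL (array : List Int) (out : Option String) : Prop := out = createPalindromeLL_alt array
instance (array : List Int) (out : Option String) : Decidable (Spec_createPalindromeLL array out) := by unfold Spec_createPalindromeLL; infer_instance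

-- ===== CLAIM (what is proved, stated in full; the proofs are below) =====
def Claim_equal_createPalindromeLL : Prop := ∀ (array : List Int), Dom_createPalindromeLL array → Spec_createPalindromeLL array (createPalindromeLL array)

-- ===== LEMMAS AND PROOFS =====
-- A's second loop reads exactly array[:-1] back to front
lemma map_pyGetD_countdown (array : List Int) (h : array ≠ []) :
    (PySem.List.pyRange 0 ((array.length : Int) - 1) 1).map
      (fun j => PySem.List.pyGetD array j 0) = array.dropLast := by
  have hlen : ((array.length : Int) - 1) = (array.dropLast.length : Int) := by
    have := List.length_pos_iff.mpr h
    simp [List.length_dropLast]; omega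
  rw [hlen]
  rw [show (List.map (fun j => PySem.List.pyGetD array j 0) (PySem.List.pyRange 0 (array.dropLast.length : Int) 1)) = List.map (fun j => PySem.List.pyGetD array.dropLast j 0) (PySem.List.pyRange 0 (array.dropLast.length : Int) 1) from List.map_congr_left ?_]
  · exact PySem.List.map_pyGetD_pyRange_zero' array.dropLast (d := 0)
  · intro j hj
    rw [PySem.List.mem_pyRange_one] at hj
    rw [PySem.List.pyGetD_eq_getElem array 0 hj.1 (by
      simp at hj ⊢; omega),
      PySem.List.pyGetD_eq_getElem array.dropLast 0 hj.1 (by simp at hj ⊢; omega)]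
    simp [List.getElem_dropLast]


-- ===== VERDICT (by name: the statement is the Claim_ definition above) =====
theorem createPalindromeLL_spec : Claim_equal_createPalindromeLL := by
  intro array hdom
  unfold Spec_createPalindromeLL
  unfold createPalindromeLL createPalindromeLL_alt
  rcases eq_or_ne array [] with rfl | h
  · simp
  · have hne : array.length ≠ 0 := by simpa using h
    simp only [hne, h, if_false]
    rw [PySem.List.foldl_pyRange_zero_pyGetD' array 0 (fun acc v => acc ++ [v]) []]
    rw [PySem.List.foldl_append_singleton]
    rw [PySem.List.pyRange_neg_one_eq_reverse]
    rw [show ((-1 : Int) + 1) = 0 from by ring, show ((array.length : Int) - 2 + 1) = (array.length : Int) - 1 from by ring]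
    rw [PySem.List.foldl_append_singleton_eq_map (fun i => PySem.List.pyGetD array i 0)]
    rw [List.map_reverse, map_pyGetD_countdown array h]
    rw [PySem.List.slice_to_neg_one, PySem.List.slice?_none_none_neg_one]
    simp [toStringA, h, List.map_dropLast]
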